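-- pv_equiv track=rewrite | github.com/Mambatukaa/problems | dsaLeetCode/dp/solvingQuestionsWithBrainpower.py | solvingQuestions
-- ===== SOURCE A (Python) =====
-- def solvingQuestions(questions):
--   n = len(questions)
--   dp = [0] * n
--
--   dp[n - 1] = questions[n - 1][0]
--
--   for i in range(n - 2, -1, -1):
--
--     point, brainPower = questions[i]
--
--     idxAfterSkip = i + brainPower + 1
--
--     if idxAfterSkip < n:
--       # possible to answer more questions
--       point += dp[idxAfterSkip]
--
--     dp[i] = max(point, dp[i + 1])
--
--   return max(dp)
-- ===== SOURCE B (Python) =====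
-- def solvingQuestions(questions):
--   n = len(questions)
--   memo = {}
--
--   def f(i):
--     # best score obtainable from questions[i:] when at least one of them is answered
--     if i == n - 1:
--       return questions[i][0]
--     if i in memo:
--       return memo[i]
--     point, brainPower = questions[i]
--     nxt = i + brainPower + 1
--     best = point + (f(nxt) if nxt < n else 0)
--     skip = f(i + 1)
--     if skip > best:
--       best = skip
--     memo[i] = best
--     return best
--
--   return f(0)
-- ===== Notes on version B (the rewrite author's own statement) =====
-- stated objective: alternative
-- what changed: Replaced A's bottom-up DP (a zero-filled array written backwards from the last question, finished by scanning max(dp)) with a top-down memoized recursion f(i) over a dict that returns f(0) directly (dp[0] is proved maximal, so the max scan disappears).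
-- outside the precondition, e.g. on solvingQuestions([[1, -2], [3, 0]]): A returns 4, B raises RecursionError
import Mathlib
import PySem

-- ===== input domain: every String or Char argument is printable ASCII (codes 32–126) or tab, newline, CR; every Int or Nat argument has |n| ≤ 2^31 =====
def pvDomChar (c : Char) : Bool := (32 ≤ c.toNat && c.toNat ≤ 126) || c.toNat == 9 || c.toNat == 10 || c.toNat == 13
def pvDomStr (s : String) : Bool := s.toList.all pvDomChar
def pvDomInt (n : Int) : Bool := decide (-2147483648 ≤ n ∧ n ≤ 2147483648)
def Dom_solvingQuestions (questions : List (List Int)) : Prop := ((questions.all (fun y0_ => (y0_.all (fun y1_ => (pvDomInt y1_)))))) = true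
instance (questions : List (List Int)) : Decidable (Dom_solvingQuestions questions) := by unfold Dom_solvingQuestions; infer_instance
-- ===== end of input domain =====

-- B replaces A's bottom-up DP (a backward-filled array finished with max(dp)) by a top-down
-- memoized recursion that returns f(0) directly; same cost, different decomposition.

-- ===== PORT A =====
-- loop body of A's backward for-loop, lifted to a named helper
def stepA (questions : List (List Int)) (n : Int) (dp : List Int) (i : Int) : List Int :=
  let q := PySem.List.pyGetD questions i []
  let point := PySem.List.pyGetD q 0 0
  let brainPower := PySem.List.pyGetD q 1 0
  let idxAfterSkip := i + brainPower + 1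
  let point := if idxAfterSkip < n then point + PySem.List.pyGetD dp idxAfterSkip 0 else point
  PySem.List.pySetD dp i (max point (PySem.List.pyGetD dp (i + 1) 0))

def solvingQuestions (questions : List (List Int)) : Int :=
  let n : Int := PySem.List.len questions
  let dp : List Int := List.replicate n.toNat 0
  let dp := PySem.List.pySetD dp (n - 1)
    (PySem.List.pyGetD (PySem.List.pyGetD questions (n - 1) []) 0 0)
  let dp := (PySem.List.pyRange (n - 2) (-1) (-1)).foldl (stepA questions n) dp
  (PySem.List.max? dp (fun y => y)).getD 0

-- ===== PORT B =====
-- B's inner recursive function f, with its memo dictionary threaded through explicitly.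
-- The Nat fuel only makes the recursion structural: under Pre_ every recursive call is at a
-- strictly larger index (brainPower ≥ 0), so fuel = len questions is never exhausted there.
def fB (questions : List (List Int)) (n : Int) :
    Nat → Int → PySem.Dict Int Int → Int × PySem.Dict Int Int
  | 0, _, memo => (0, memo)
  | fuel + 1, i, memo =>
    if i = n - 1 then (PySem.List.pyGetD (PySem.List.pyGetD questions i []) 0 0, memo)
    else
      match PySem.Dict.get? memo i with
      | some v => (v, memo)
      | none =>
        let q := PySem.List.pyGetD questions i []
        let point := PySem.List.pyGetD q 0 0
        let brainPower := PySem.List.pyGetD q 1 0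
        let nxt := i + brainPower + 1
        let br := if nxt < n then
            (let r := fB questions n fuel nxt memo; (point + r.1, r.2))
          else (point, memo)
        let sr := fB questions n fuel (i + 1) br.2
        let best := if sr.1 > br.1 then sr.1 else br.1
        (best, PySem.Dict.insert sr.2 i best)

def solvingQuestions_alt (questions : List (List Int)) : Int :=
  let n : Int := PySem.List.len questions
  (fB questions n questions.length 0 PySem.Dict.empty).1

-- ===== PRECONDITION & SPEC =====
-- Pre_ is the natural domain: a nonempty list whose answerable questions (all but the last) are
-- [points, brainpower] pairs with nonnegative brainpower, the last question nonempty.  Outside it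
-- A raises (empty list, a non-pair row before the last), or a negative brainpower keeps the next
-- index from advancing and B's recursion does not terminate (RecursionError).
def Pre_solvingQuestions (questions : List (List Int)) : Prop :=
  questions ≠ [] ∧
  1 ≤ (questions.getD (questions.length - 1) []).length ∧
  ∀ i < questions.length - 1,
    (questions.getD i []).length = 2 ∧ 0 ≤ PySem.List.pyGetD (questions.getD i []) 1 0
instance (questions : List (List Int)) : Decidable (Pre_solvingQuestions questions) := by
  unfold Pre_solvingQuestions; infer_instance

def pvWitness_solvingQuestions : List (List Int) := [[3, 1], [4, 0], [2, 2]]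

def Spec_solvingQuestions (questions : List (List Int)) (out : Int) : Prop := out = solvingQuestions_alt questions
instance (questions : List (List Int)) (out : Int) : Decidable (Spec_solvingQuestions questions out) := by unfold Spec_solvingQuestions; infer_instance

-- ===== CLAIM (what is proved, stated in full; the proofs are below) =====
def Claim_equal_solvingQuestions : Prop := ∀ (questions : List (List Int)), Dom_solvingQuestions questions → Pre_solvingQuestions questions → Spec_solvingQuestions questions (solvingQuestions questions)

-- ===== LEMMAS AND PROOFS =====

-- the common specification: best score from a nonempty suffix when at least one question of it is
-- answered, the last question being terminal (exactly A's recurrence, read off the suffix)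
def bestM : List (List Int) → Int
  | [] => 0
  | [q] => PySem.List.pyGetD q 0 0
  | q :: r :: rs =>
      max (PySem.List.pyGetD q 0 0 +
            (if (PySem.List.pyGetD q 1 0).toNat < (r :: rs).length then
              bestM ((r :: rs).drop (PySem.List.pyGetD q 1 0).toNat) else 0))
        (bestM (r :: rs))
termination_by l => l.length
decreasing_by
  · simp only [List.length_drop, List.length_cons]; omega
  · simp only [List.length_cons]; omega

theorem bestM_single (q : List Int) : bestM [q] = PySem.List.pyGetD q 0 0 := by
  simp [bestM]

theorem bestM_cons2 (q r : List Int) (rs : List (List Int)) :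
    bestM (q :: r :: rs) = max (PySem.List.pyGetD q 0 0 +
        (if (PySem.List.pyGetD q 1 0).toNat < (r :: rs).length then
          bestM ((r :: rs).drop (PySem.List.pyGetD q 1 0).toNat) else 0))
      (bestM (r :: rs)) := by
  simp [bestM]

-- A's recurrence on the array, phrased on suffixes of the question list
theorem bestM_drop (qs : List (List Int)) (i : Nat) (h : i + 1 < qs.length) :
    bestM (qs.drop i)
      = max (PySem.List.pyGetD (qs.getD i []) 0 0 +
          (if i + 1 + (PySem.List.pyGetD (qs.getD i []) 1 0).toNat < qs.length then
            bestM (qs.drop (i + 1 + (PySem.List.pyGetD (qs.getD i []) 1 0).toNat)) else 0))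
        (bestM (qs.drop (i + 1))) := by
  have h1 : qs.drop i = qs[i]'(by omega) :: qs.drop (i + 1) := List.drop_eq_getElem_cons (by omega)
  have h2 : qs.drop (i + 1) = qs[i + 1]'h :: qs.drop (i + 2) := List.drop_eq_getElem_cons h
  have hg : qs.getD i [] = qs[i]'(by omega) := List.getD_eq_getElem qs [] (by omega)
  rw [hg]
  conv_lhs => rw [h1, h2]
  rw [bestM_cons2, ← h2]
  have hlen : (qs.drop (i + 1)).length = qs.length - (i + 1) := List.length_drop
  by_cases hc : i + 1 + (PySem.List.pyGetD (qs[i]'(by omega)) 1 0).toNat < qs.length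
  · rw [if_pos (by omega), if_pos hc, List.drop_drop]
  · rw [if_neg (by omega), if_neg hc]

theorem bestM_drop_succ_le (qs : List (List Int)) (i : Nat) (h : i + 1 < qs.length) :
    bestM (qs.drop (i + 1)) ≤ bestM (qs.drop i) := by
  rw [bestM_drop qs i h]
  exact le_max_right _ _

theorem bestM_drop_le_zero (qs : List (List Int)) (j : Nat) (hj : j < qs.length) :
    bestM (qs.drop j) ≤ bestM qs := by
  induction j with
  | zero => simp
  | succ k ih =>
      exact le_trans (bestM_drop_succ_le qs k hj) (ih (by omega))

theorem getD_set_self (l : List Int) (t : Nat) (x : Int) (h : t < l.length) :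
    (l.set t x).getD t 0 = x := by
  simp [List.getD]
  rw [List.getElem?_set_self (by simpa using h)]; rfl

theorem getD_set_ne (l : List Int) (t k : Nat) (x : Int) (h : k ≠ t) :
    (l.set t x).getD k 0 = l.getD k 0 := by
  simp [List.getD, List.getElem?_set_ne (by omega : t ≠ k)]

theorem if_gt_eq_max (b a : Int) : (if a > b then a else b) = max b a := by
  by_cases h : a > b
  · rw [if_pos h, max_eq_right (le_of_lt h)]
  · rw [if_neg h, max_eq_left (by omega)]

-- a list whose elements are all ≤ the accumulator folds max to the accumulator
theorem foldl_max_of_le (t : List Int) (x : Int) (h : ∀ y ∈ t, y ≤ x) :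
    t.foldl max x = x := by
  induction t generalizing x with
  | nil => rfl
  | cons y t ih =>
      have hx : max x y = x := max_eq_left (h y (by simp))
      simp only [List.foldl_cons, hx]
      exact ih x (fun z hz => h z (by simp [hz]))

-- ===== A-side =====

theorem stepA_spec (qs : List (List Int)) (dp : List Int) (s : Nat)
    (hrow : (qs.getD s []).length = 2 ∧ 0 ≤ PySem.List.pyGetD (qs.getD s []) 1 0)
    (hlen : dp.length = qs.length) (hs : s + 1 < qs.length)
    (hinv : ∀ j : Nat, s < j → j < qs.length → dp.getD j 0 = bestM (qs.drop j)) :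
    (stepA qs (qs.length : Int) dp (s : Int)).length = qs.length ∧
    (∀ j : Nat, s ≤ j → j < qs.length →
      (stepA qs (qs.length : Int) dp (s : Int)).getD j 0 = bestM (qs.drop j)) := by
  obtain ⟨hlen2, hbp⟩ := hrow
  set p := PySem.List.pyGetD (qs.getD s []) 0 0 with hp'
  set bp := PySem.List.pyGetD (qs.getD s []) 1 0 with hbp'
  have hidx : (s : Int) + bp + 1 = ((s + 1 + bp.toNat : Nat) : Int) := by omega
  have hcast : (s : Int) + 1 = ((s + 1 : Nat) : Int) := by push_cast; ring
  have hnext : dp.getD (s + 1) 0 = bestM (qs.drop (s + 1)) := hinv (s + 1) (by omega) hs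
  have hpoint : (if ((s + 1 + bp.toNat : Nat) : Int) < (qs.length : Int)
        then p + dp.getD (s + 1 + bp.toNat) 0 else p)
      = p + (if s + 1 + bp.toNat < qs.length then bestM (qs.drop (s + 1 + bp.toNat)) else 0) := by
    by_cases hlt : s + 1 + bp.toNat < qs.length
    · rw [if_pos (by exact_mod_cast hlt), if_pos hlt, hinv (s + 1 + bp.toNat) (by omega) hlt]
    · rw [if_neg (by exact_mod_cast hlt), if_neg hlt, add_zero]
  have hstep : stepA qs (qs.length : Int) dp (s : Int)
      = dp.set s (max (p + (if s + 1 + bp.toNat < qs.length then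
          bestM (qs.drop (s + 1 + bp.toNat)) else 0)) (bestM (qs.drop (s + 1)))) := by
    simp only [stepA, hidx, hcast, PySem.List.pyGetD_natCast, PySem.List.pySetD_natCast,
      ← hp', ← hbp', hpoint, hnext]
  rw [hstep]
  refine ⟨by rw [List.length_set, hlen], fun j hj1 hj2 => ?_⟩
  by_cases hjs : j = s
  · subst hjs
    rw [getD_set_self dp j _ (by omega), bestM_drop qs j hs]
  · rw [getD_set_ne dp s j _ hjs, hinv j (by omega) hj2]

theorem loopA_inv (qs : List (List Int))
    (hq : ∀ i < qs.length - 1,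
      (qs.getD i []).length = 2 ∧ 0 ≤ PySem.List.pyGetD (qs.getD i []) 1 0) :
    ∀ (t : Nat) (dp : List Int), t < qs.length → dp.length = qs.length →
    (∀ j : Nat, t ≤ j → j < qs.length → dp.getD j 0 = bestM (qs.drop j)) →
    ((PySem.List.pyRange ((t : Int) - 1) (-1) (-1)).foldl (stepA qs (qs.length : Int)) dp).length = qs.length ∧
    (∀ j : Nat, j < qs.length →
      ((PySem.List.pyRange ((t : Int) - 1) (-1) (-1)).foldl (stepA qs (qs.length : Int)) dp).getD j 0
        = bestM (qs.drop j)) := by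
  intro t
  induction t with
  | zero =>
      intro dp _ hlen hinv
      rw [show ((0 : Nat) : Int) - 1 = -1 by omega, PySem.List.pyRange_neg_one_eq_nil (by omega),
        List.foldl_nil]
      exact ⟨hlen, fun j hj => hinv j (by omega) hj⟩
  | succ t ih =>
      intro dp ht hlen hinv
      rw [show ((t + 1 : Nat) : Int) - 1 = (t : Int) by omega,
        PySem.List.pyRange_neg_one_cons (by omega), List.foldl_cons]
      obtain ⟨hlen', hval'⟩ := stepA_spec qs dp t (hq t (by omega)) hlen (by omega)
        (fun j hj1 hj2 => hinv j (by omega) hj2)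
      rw [show (t : Int) - 1 = ((t : Nat) : Int) - 1 by omega] at *
      exact ih (stepA qs (qs.length : Int) dp (t : Int)) (by omega) hlen'
        (fun j hj1 hj2 => hval' j hj1 hj2)

-- ===== B-side =====

-- every memo entry is a correct suffix value at a nonnegative in-range index
def MemoOK (qs : List (List Int)) (m : PySem.Dict Int Int) : Prop :=
  ∀ (k : Int) (v : Int), PySem.Dict.get? m k = some v →
    0 ≤ k ∧ k.toNat < qs.length ∧ v = bestM (qs.drop k.toNat)

theorem memoOK_empty (qs : List (List Int)) : MemoOK qs PySem.Dict.empty := by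
  intro k v h
  rw [PySem.Dict.get?_empty] at h
  exact absurd h (by simp)

theorem fB_spec (qs : List (List Int))
    (hq : ∀ i < qs.length - 1,
      (qs.getD i []).length = 2 ∧ 0 ≤ PySem.List.pyGetD (qs.getD i []) 1 0) :
    ∀ (fuel i : Nat) (memo : PySem.Dict Int Int), i < qs.length → qs.length - i ≤ fuel →
    MemoOK qs memo →
    (fB qs (qs.length : Int) fuel (i : Int) memo).1 = bestM (qs.drop i) ∧
    MemoOK qs (fB qs (qs.length : Int) fuel (i : Int) memo).2 := by
  intro fuel
  induction fuel with
  | zero => intro i memo hi hfuel _; omega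
  | succ fuel ih =>
      intro i memo hi hfuel hm
      by_cases hlast : i = qs.length - 1
      · have hieq : (i : Int) = (qs.length : Int) - 1 := by omega
        rw [show (fB qs (qs.length : Int) (fuel + 1) (i : Int) memo)
            = (PySem.List.pyGetD (PySem.List.pyGetD qs (i : Int) []) 0 0, memo) by
          simp [fB, hieq]]
        refine ⟨?_, hm⟩
        have hdrop : qs.drop i = [qs[i]'hi] := by
          rw [List.drop_eq_getElem_cons hi, show i + 1 = qs.length by omega, List.drop_length]
        rw [hdrop, bestM_single, PySem.List.pyGetD_natCast, List.getD_eq_getElem qs [] hi]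
      · have hstep : fB qs (qs.length : Int) (fuel + 1) (i : Int) memo
            = match PySem.Dict.get? memo (i : Int) with
              | some v => (v, memo)
              | none =>
                let q := PySem.List.pyGetD qs (i : Int) []
                let point := PySem.List.pyGetD q 0 0
                let brainPower := PySem.List.pyGetD q 1 0
                let nxt := (i : Int) + brainPower + 1
                let br := if nxt < (qs.length : Int) then
                    (let r := fB qs (qs.length : Int) fuel nxt memo; (point + r.1, r.2))
                  else (point, memo)
                let sr := fB qs (qs.length : Int) fuel ((i : Int) + 1) br.2
                let best := if sr.1 > br.1 then sr.1 else br.1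
                (best, PySem.Dict.insert sr.2 (i : Int) best) := by
          simp only [fB, if_neg (show ¬ (i : Int) = (qs.length : Int) - 1 by omega)]
        rw [hstep]
        rcases hget : PySem.Dict.get? memo (i : Int) with _ | v
        · simp only []
          obtain ⟨hlen2, hbp⟩ := hq i (by omega)
          set p := PySem.List.pyGetD (PySem.List.pyGetD qs (i : Int) []) 0 0 with hp'
          set bp := PySem.List.pyGetD (PySem.List.pyGetD qs (i : Int) []) 1 0 with hbp'
          have hbp0 : 0 ≤ bp := by
            rw [hbp', PySem.List.pyGetD_natCast]; exact hbp
          have hnxt : (i : Int) + bp + 1 = ((i + 1 + bp.toNat : Nat) : Int) := by omega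
          have hbr : (if (i : Int) + bp + 1 < (qs.length : Int) then
                (let r := fB qs (qs.length : Int) fuel ((i : Int) + bp + 1) memo;
                  (p + r.1, r.2))
              else (p, memo)).1
              = p + (if i + 1 + bp.toNat < qs.length then
                  bestM (qs.drop (i + 1 + bp.toNat)) else 0) ∧
              MemoOK qs (if (i : Int) + bp + 1 < (qs.length : Int) then
                (let r := fB qs (qs.length : Int) fuel ((i : Int) + bp + 1) memo;
                  (p + r.1, r.2))
              else (p, memo)).2 := by
            by_cases hlt : i + 1 + bp.toNat < qs.length
            · rw [if_pos (by omega), if_pos hlt, hnxt]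
              obtain ⟨hv, hmo⟩ := ih (i + 1 + bp.toNat) memo hlt (by omega) hm
              constructor
              · show p + (fB qs (qs.length : Int) fuel ((i + 1 + bp.toNat : Nat) : Int) memo).1 = _
                rw [hv]
              · show MemoOK qs (fB qs (qs.length : Int) fuel ((i + 1 + bp.toNat : Nat) : Int) memo).2
                exact hmo
            · rw [if_neg (by omega), if_neg hlt, add_zero]
              exact ⟨rfl, hm⟩
          obtain ⟨hbr1, hbr2⟩ := hbr
          have hcast : (i : Int) + 1 = ((i + 1 : Nat) : Int) := by push_cast; ring
          obtain ⟨hsr1, hsr2⟩ := ih (i + 1) _ (by omega) (by omega) hbr2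
          rw [← hcast] at hsr1 hsr2
          have hqd : PySem.List.pyGetD qs (i : Int) [] = qs.getD i [] := by simp
          constructor
          · show (if _ > _ then _ else _) = _
            rw [hbr1, hsr1, if_gt_eq_max, bestM_drop qs i (by omega), hp', hbp', hqd]
          · intro k v hk
            rw [PySem.Dict.get?_insert] at hk
            by_cases hki : k = (i : Int)
            · rw [if_pos hki] at hk
              cases hk
              subst hki
              refine ⟨by omega, by omega, ?_⟩
              rw [show ((i : Int)).toNat = i by omega]
              show (if _ > _ then _ else _) = _
              rw [hbr1, hsr1, if_gt_eq_max, bestM_drop qs i (by omega), hp', hbp', hqd]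
            · rw [if_neg hki] at hk
              exact hsr2 k v hk
        · obtain ⟨hk0, hkl, hkv⟩ := hm (i : Int) v hget
          simp only []
          rw [show ((i : Int)).toNat = i by omega] at hkv
          exact ⟨hkv, hm⟩

-- ===== endpoint characterisations =====

theorem portA_eq_bestM (qs : List (List Int)) (hpre : Pre_solvingQuestions qs) :
    solvingQuestions qs = bestM qs := by
  obtain ⟨hne, hlast, hq⟩ := hpre
  have hL : 1 ≤ qs.length := List.length_pos_of_ne_nil hne
  have h1 : ((qs.length : Int)).toNat = qs.length := Int.toNat_natCast qs.length
  have h2 : (qs.length : Int) - 1 = ((qs.length - 1 : Nat) : Int) := by omega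
  have h3 : (qs.length : Int) - 2 = ((qs.length - 1 : Nat) : Int) - 1 := by omega
  have hsl : qs.length - 1 < qs.length := by omega
  have hgq : qs.getD (qs.length - 1) [] = qs[qs.length - 1] :=
    List.getD_eq_getElem qs [] hsl
  set dp1 := (List.replicate qs.length (0 : Int)).set (qs.length - 1)
    (PySem.List.pyGetD qs[qs.length - 1] 0 0) with hdp1
  have hdp1len : dp1.length = qs.length := by
    rw [hdp1, List.length_set, List.length_replicate]
  have hbase : ∀ j : Nat, qs.length - 1 ≤ j → j < qs.length → dp1.getD j 0 = bestM (qs.drop j) := by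
    intro j hj1 hj2
    have hj : j = qs.length - 1 := by omega
    subst hj
    rw [hdp1, getD_set_self _ _ _ (by rw [List.length_replicate]; omega),
      List.drop_eq_getElem_cons hj2, show qs.length - 1 + 1 = qs.length by omega,
      List.drop_length, bestM_single]
  obtain ⟨hflen, hfval⟩ := loopA_inv qs hq (qs.length - 1) dp1 (by omega) hdp1len hbase
  have hport : solvingQuestions qs
      = (PySem.List.max? ((PySem.List.pyRange (((qs.length - 1 : Nat) : Int) - 1) (-1) (-1)).foldl
          (stepA qs (qs.length : Int)) dp1) (fun y => y)).getD 0 := by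
    simp only [solvingQuestions, PySem.List.len_eq, h1, h2, h3, PySem.List.pyGetD_natCast,
      PySem.List.pySetD_natCast, hgq, hdp1]
  rw [hport]
  set dpF := (PySem.List.pyRange (((qs.length - 1 : Nat) : Int) - 1) (-1) (-1)).foldl
    (stepA qs (qs.length : Int)) dp1 with hdpF
  rcases hF : dpF with _ | ⟨x, tl⟩
  · rw [hF] at hflen
    simp at hflen
    omega
  · have hx : x = bestM qs := by
      have h00 := hfval 0 (by omega)
      rw [hF] at h00
      simpa [List.drop_zero] using h00
    rw [PySem.List.max?_id_cons, Option.getD_some,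
      foldl_max_of_le tl x ?_, hx]
    intro y hy
    have hym : y ∈ dpF := by rw [hF]; exact List.mem_cons_of_mem x hy
    obtain ⟨k, hk, hky⟩ := List.mem_iff_getElem.mp hym
    have hkL : k < qs.length := by rw [hflen] at hk; exact hk
    have : y = bestM (qs.drop k) := by
      rw [← hfval k hkL, List.getD_eq_getElem dpF 0 hk, hky]
    rw [this, hx]
    exact bestM_drop_le_zero qs k hkL

theorem portB_eq_bestM (qs : List (List Int)) (hpre : Pre_solvingQuestions qs) :
    solvingQuestions_alt qs = bestM qs := by
  obtain ⟨hne, hlast, hq⟩ := hpre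
  have hL : 1 ≤ qs.length := List.length_pos_of_ne_nil hne
  have h0 : ((0 : Nat) : Int) = (0 : Int) := rfl
  obtain ⟨hv, _⟩ := fB_spec qs hq qs.length 0 PySem.Dict.empty (by omega) (by omega)
    (memoOK_empty qs)
  rw [h0] at hv
  simp only [solvingQuestions_alt, PySem.List.len_eq]
  rw [hv, List.drop_zero]

-- ===== VERDICT (by name: the statement is the Claim_ definition above) =====
theorem solvingQuestions_spec : Claim_equal_solvingQuestions := by
  intro qs _ hpre
  unfold Spec_solvingQuestions
  rw [portA_eq_bestM qs hpre, portB_eq_bestM qs hpre]
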